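-- pv_equiv track=rewrite | github.com/phenomenoner/openclaw-mem | openclaw_mem/provenance_trust_schema.py | normalize_provenance_kind_counts
-- ===== SOURCE A (Python) =====
-- from typing import Any, Dict, Mapping
--
-- PROVENANCE_KINDS = ("none", "url", "file_line", "file_anchor", "receipt", "opaque")
--
-- _PROVENANCE_KIND_ALIASES = {
--     "fileline": "file_line",
--     "file-line": "file_line",
--     "fileanchor": "file_anchor",
--     "file-anchor": "file_anchor",
-- }
--
-- def normalize_provenance_kind(raw: Any) -> str:
--     token = str(raw or "").strip().lower().replace("-", "_")
--     if not token:
--         return "none"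
--     token = _PROVENANCE_KIND_ALIASES.get(token, token)
--     if token in PROVENANCE_KINDS:
--         return token
--     return "opaque"
--
-- def normalize_provenance_kind_counts(raw: Any) -> Dict[str, int]:
--     src = raw if isinstance(raw, Mapping) else {}
--     out: Dict[str, int] = {}
--     for key in sorted(src.keys(), key=lambda x: str(x)):
--         try:
--             count = int(src.get(key, 0))
--         except Exception:
--             count = 0
--         if count <= 0:
--             continue
--         kind = normalize_provenance_kind(key)
--         out[kind] = int(out.get(kind, 0)) + int(count)
--     return {k: int(out[k]) for k in sorted(out.keys())}
-- ===== SOURCE B (Python) =====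
-- from typing import Any, Dict, Mapping
--
-- PROVENANCE_KINDS = ("none", "url", "file_line", "file_anchor", "receipt", "opaque")
--
-- _PROVENANCE_KIND_ALIASES = {
--     "fileline": "file_line",
--     "file-line": "file_line",
--     "fileanchor": "file_anchor",
--     "file-anchor": "file_anchor",
-- }
--
-- def _norm_kind(raw):
--     token = str(raw or "").strip().lower().replace("-", "_")
--     if not token:
--         return "none"
--     token = _PROVENANCE_KIND_ALIASES.get(token, token)
--     return token if token in PROVENANCE_KINDS else "opaque"
--
-- def normalize_provenance_kind_counts(raw: Any) -> Dict[str, int]: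
--     src = raw if isinstance(raw, Mapping) else {}
--     result: Dict[str, int] = {}
--     for kind in sorted(PROVENANCE_KINDS):
--         total = 0
--         for key, value in src.items():
--             try:
--                 count = int(value)
--             except Exception:
--                 count = 0
--             if count <= 0:
--                 continue
--             if _norm_kind(key) == kind:
--                 total += count
--         if total > 0:
--             result[kind] = total
--     return result
-- ===== Notes on version B (the rewrite author's own statement) =====
-- stated objective: alternative
-- what changed: B replaces A's single sorted-key accumulation pass plus final output sort by an outer loop over the six canonical kinds in sorted order, each rescanning the whole mapping and summing the positive counts that normalize to that kind, emitting the kind only when the sum is positive; this produces sorted keys by construction with no intermediate dict and no output sort.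
import Mathlib
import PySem

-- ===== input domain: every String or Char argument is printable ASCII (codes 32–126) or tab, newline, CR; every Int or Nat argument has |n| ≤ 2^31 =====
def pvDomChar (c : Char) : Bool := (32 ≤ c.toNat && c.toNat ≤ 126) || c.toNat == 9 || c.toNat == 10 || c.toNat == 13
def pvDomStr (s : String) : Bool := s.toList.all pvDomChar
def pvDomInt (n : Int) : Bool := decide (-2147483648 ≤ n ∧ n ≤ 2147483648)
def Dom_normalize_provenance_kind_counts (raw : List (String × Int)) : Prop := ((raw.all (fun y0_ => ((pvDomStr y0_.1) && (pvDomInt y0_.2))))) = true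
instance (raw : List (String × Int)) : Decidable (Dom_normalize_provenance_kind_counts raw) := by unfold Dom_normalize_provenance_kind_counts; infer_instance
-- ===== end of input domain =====

-- B replaces A's single sorted-key accumulation pass plus output sort by an outer loop over the
-- six canonical kinds in sorted order, rescanning the mapping once per kind ('alternative', not faster).

-- ===== PORT A =====
-- PROVENANCE_KINDS (module constant, in source order)
def pvKinds : List String := ["none", "url", "file_line", "file_anchor", "receipt", "opaque"]

-- normalize_provenance_kind; for a string key, str(raw or "") is raw itself (the empty string is
-- falsy and str("") = ""), so the 'raw or ""' step is the identity on the String domain.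
def normKind (raw : String) : String :=
  let token := PySem.Str.replace (PySem.Str.lower (PySem.Str.strip raw)) "-" "_"
  if token = "" then "none"
  else
    let token := (PySem.Dict.ofList [("fileline", "file_line"), ("file-line", "file_line"),
        ("fileanchor", "file_anchor"), ("file-anchor", "file_anchor")]).getD token token
    if token ∈ pvKinds then token else "opaque"

-- the dict argument; src.get(key, 0) for key drawn from src.keys(); int(count) is the identity on Int
def normalize_provenance_kind_counts (raw : List (String × Int)) : List (String × Int) :=
  let src := PySem.Dict.ofList raw
  let out := (PySem.List.sorted src.keys (fun x => x)).foldl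
    (fun acc key =>
      let count := src.getD key 0
      if count ≤ 0 then acc
      else
        let kind := normKind key
        acc.insert kind (acc.getD kind 0 + count))
    PySem.Dict.empty
  (PySem.List.sorted out.keys (fun x => x)).map (fun k => (k, out.getD k 0))

-- ===== PORT B =====
-- inner scan of B: sum of the positive counts whose normalized key equals `kind`
def kindTotal (items : List (String × Int)) (kind : String) : Int :=
  items.foldl (fun total p =>
    let count := p.2
    if count ≤ 0 then total
    else if normKind p.1 = kind then total + count else total) 0

def normalize_provenance_kind_counts_alt (raw : List (String × Int)) : List (String × Int) :=
  let src := PySem.Dict.ofList raw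
  (PySem.List.sorted pvKinds (fun x => x)).foldl
    (fun result kind =>
      let total := kindTotal src.items kind
      if 0 < total then result ++ [(kind, total)] else result) []

-- ===== PRECONDITION & SPEC =====
def Spec_normalize_provenance_kind_counts (raw : List (String × Int)) (out : List (String × Int)) : Prop := out = normalize_provenance_kind_counts_alt raw
instance (raw : List (String × Int)) (out : List (String × Int)) : Decidable (Spec_normalize_provenance_kind_counts raw out) := by unfold Spec_normalize_provenance_kind_counts; infer_instance

-- ===== CLAIM (what is proved, stated in full; the proofs are below) =====
def Claim_equal_normalize_provenance_kind_counts : Prop := ∀ (raw : List (String × Int)), Dom_normalize_provenance_kind_counts raw → Spec_normalize_provenance_kind_counts raw (normalize_provenance_kind_counts raw)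

-- ===== LEMMAS AND PROOFS =====

-- sorted(PROVENANCE_KINDS) as a literal
def pvKS : List String := ["file_anchor", "file_line", "none", "opaque", "receipt", "url"]

theorem sorted_pvKinds : PySem.List.sorted pvKinds (fun x => x) = pvKS := by
  simp only [pvKinds, pvKS, PySem.List.sorted, String.lt_iff_toList_lt, String.toList]
  decide

theorem pvKS_nodup : pvKS.Nodup := by decide

theorem pvKS_pairwise : pvKS.Pairwise (fun a b => a < b) := by
  have h := PySem.List.sorted_ofList_pairwise_lt (xs := pvKinds)
  rw [show PySem.Set.ofList pvKinds = pvKinds from PySem.Set.ofList_eq_self_of_nodup _ (by decide), sorted_pvKinds] at h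
  exact h

theorem mem_pvKS (x : String) : x ∈ pvKS ↔ x ∈ pvKinds := by
  simp only [pvKS, pvKinds, List.mem_cons, List.not_mem_nil]
  tauto

theorem normKind_mem (s : String) : normKind s ∈ pvKinds := by
  unfold normKind
  simp only []
  split_ifs with h1 h2
  · simp [pvKinds]
  · exact h2
  · simp [pvKinds]

-- total of the positive counts (under c) of the keys of l that normalize to k
def pvT (c : String → Int) (k : String) (l : List String) : Int :=
  ((l.filter (fun key => decide (0 < c key) && (normKind key == k))).map c).sum

theorem pvT_nil (c : String → Int) (k : String) : pvT c k [] = 0 := rfl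

theorem pvT_cons (c : String → Int) (k a : String) (t : List String) :
    pvT c k (a :: t) = (if 0 < c a ∧ normKind a = k then c a else 0) + pvT c k t := by
  by_cases h : 0 < c a ∧ normKind a = k
  · simp [pvT, h.1, h.2]
  · rw [if_neg h, zero_add]
    have hb : (decide (0 < c a) && (normKind a == k)) = false := by
      rcases not_and_or.1 h with h1 | h2
      · simp [h1]
      · simp [h2]
    simp [pvT, hb]

theorem pvT_nonneg (c : String → Int) (k : String) (l : List String) : 0 ≤ pvT c k l := by
  induction l with
  | nil => simp [pvT_nil]
  | cons a t ih =>
    rw [pvT_cons]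
    split_ifs with h
    · have := h.1; omega
    · omega

theorem pvT_pos_iff (c : String → Int) (k : String) (l : List String) :
    0 < pvT c k l ↔ ∃ key ∈ l, 0 < c key ∧ normKind key = k := by
  induction l with
  | nil => simp [pvT_nil]
  | cons a t ih =>
    rw [pvT_cons]
    by_cases h : 0 < c a ∧ normKind a = k
    · rw [if_pos h]
      constructor
      · intro _; exact ⟨a, List.mem_cons_self, h⟩
      · intro _; have := pvT_nonneg c k t; have := h.1; omega
    · rw [if_neg h, zero_add, ih]
      constructor
      · rintro ⟨key, hm, hk⟩; exact ⟨key, List.mem_cons_of_mem a hm, hk⟩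
      · rintro ⟨key, hm, hk⟩
        rcases List.mem_cons.1 hm with rfl | hm'
        · exact absurd hk h
        · exact ⟨key, hm', hk⟩

theorem pvT_perm (c : String → Int) (k : String) {l l' : List String} (h : l.Perm l') :
    pvT c k l = pvT c k l' :=
  List.Perm.sum_eq ((h.filter _).map _)

-- A's accumulation loop: lookup in the accumulated dict
theorem pvFoldl_getD (src : PySem.Dict String Int) (l : List String)
    (d0 : PySem.Dict String Int) (k : String) :
    (l.foldl (fun acc key =>
        if src.getD key 0 ≤ 0 then acc
        else acc.insert (normKind key) (acc.getD (normKind key) 0 + src.getD key 0)) d0).getD k 0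
      = d0.getD k 0 + pvT (fun key => src.getD key 0) k l := by
  induction l generalizing d0 with
  | nil => simp [pvT_nil]
  | cons a t ih =>
    rw [List.foldl_cons, ih, pvT_cons]
    by_cases hc : src.getD a 0 ≤ 0
    · rw [if_pos hc, if_neg (fun h => absurd h.1 (not_lt.2 hc)), zero_add]
    · rw [if_neg hc, PySem.Dict.getD_insert]
      by_cases hk : k = normKind a
      · rw [if_pos hk, if_pos ⟨not_le.1 hc, hk.symm⟩, hk]
        ring
      · rw [if_neg hk, if_neg (fun h => hk h.2.symm), zero_add]

-- A's accumulation loop: which kinds appear as keys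
theorem pvFoldl_mem_keys (src : PySem.Dict String Int) (l : List String)
    (d0 : PySem.Dict String Int) (k : String) :
    k ∈ (l.foldl (fun acc key =>
        if src.getD key 0 ≤ 0 then acc
        else acc.insert (normKind key) (acc.getD (normKind key) 0 + src.getD key 0)) d0).keys
      ↔ k ∈ d0.keys ∨ ∃ key ∈ l, 0 < src.getD key 0 ∧ normKind key = k := by
  induction l generalizing d0 with
  | nil => simp
  | cons a t ih =>
    rw [List.foldl_cons, ih]
    by_cases hc : src.getD a 0 ≤ 0
    · rw [if_pos hc]
      constructor
      · rintro (hd | ⟨key, hm, hk⟩)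
        · exact Or.inl hd
        · exact Or.inr ⟨key, List.mem_cons_of_mem a hm, hk⟩
      · rintro (hd | ⟨key, hm, hk⟩)
        · exact Or.inl hd
        · rcases List.mem_cons.1 hm with rfl | hm'
          · exact absurd hk.1 (not_lt.2 hc)
          · exact Or.inr ⟨key, hm', hk⟩
    · rw [if_neg hc]
      simp only [PySem.Dict.mem_keys_insert]
      constructor
      · rintro ((heq | hd) | ⟨key, hm, hk⟩)
        · exact Or.inr ⟨a, List.mem_cons_self, not_le.1 hc, heq.symm⟩
        · exact Or.inl hd
        · exact Or.inr ⟨key, List.mem_cons_of_mem a hm, hk⟩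
      · rintro (hd | ⟨key, hm, hk⟩)
        · exact Or.inl (Or.inr hd)
        · rcases List.mem_cons.1 hm with rfl | hm'
          · exact Or.inl (Or.inl hk.2.symm)
          · exact Or.inr ⟨key, hm', hk⟩

-- A's accumulation loop keeps its keys distinct
theorem pvFoldl_nodup (src : PySem.Dict String Int) (l : List String)
    (d0 : PySem.Dict String Int) (h : d0.keys.Nodup) :
    (l.foldl (fun acc key =>
        if src.getD key 0 ≤ 0 then acc
        else acc.insert (normKind key) (acc.getD (normKind key) 0 + src.getD key 0)) d0).keys.Nodup := by
  induction l generalizing d0 with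
  | nil => exact h
  | cons a t ih =>
    rw [List.foldl_cons]
    by_cases hc : src.getD a 0 ≤ 0
    · rw [if_pos hc]; exact ih d0 h
    · rw [if_neg hc]; exact ih _ (PySem.Dict.nodup_keys_insert _ _ _ h)

-- sorting a duplicate-free sublist of the six kinds = filtering the sorted kinds
theorem sorted_eq_filter (l : List String) (hnd : l.Nodup) (hsub : ∀ x ∈ l, x ∈ pvKinds) :
    PySem.List.sorted l (fun x => x) = pvKS.filter (fun k => decide (k ∈ l)) := by
  apply PySem.List.sorted_eq_of_perm_of_pairwise_lt
  · apply (List.perm_ext_iff_of_nodup (pvKS_nodup.filter _) hnd).2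
    intro x
    simp only [List.mem_filter, decide_eq_true_iff]
    exact ⟨fun hx => hx.2, fun hx => ⟨(mem_pvKS x).2 (hsub x hx), hx⟩⟩
  · exact pvKS_pairwise.filter _

-- B's outer loop appends exactly the kinds with positive total
theorem pvB_foldl (I : List (String × Int)) (l : List String) (acc : List (String × Int)) :
    l.foldl (fun result kind =>
        if 0 < kindTotal I kind then result ++ [(kind, kindTotal I kind)] else result) acc
      = acc ++ (l.filter (fun k => decide (0 < kindTotal I k))).map (fun k => (k, kindTotal I k)) := by
  induction l generalizing acc with
  | nil => simp
  | cons a t ih =>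
    rw [List.foldl_cons, List.filter_cons]
    by_cases h : 0 < kindTotal I a
    · rw [if_pos h, ih, decide_eq_true h, if_pos rfl]
      simp
    · rw [if_neg h, ih, decide_eq_false h, if_neg (by simp)]

-- B's inner scan as a filtered sum
theorem kindTotal_eq_sum (I : List (String × Int)) (k : String) :
    kindTotal I k
      = ((I.filter (fun p => decide (0 < p.2) && (normKind p.1 == k))).map (fun p => p.2)).sum := by
  unfold kindTotal
  suffices h : ∀ t : Int, I.foldl (fun total p =>
      if p.2 ≤ 0 then total
      else if normKind p.1 = k then total + p.2 else total) t
        = t + ((I.filter (fun p => decide (0 < p.2) && (normKind p.1 == k))).map (fun p => p.2)).sum by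
    simpa using h 0
  induction I with
  | nil => intro t; simp
  | cons a t ih =>
    intro s
    rw [List.foldl_cons, List.filter_cons]
    by_cases hc : a.2 ≤ 0
    · rw [if_pos hc, ih]
      have hb : (decide (0 < a.2) && (normKind a.1 == k)) = false := by simp [not_lt.2 hc]
      rw [hb, if_neg (by simp)]
    · rw [if_neg hc]
      by_cases hk : normKind a.1 = k
      · rw [if_pos hk, ih]
        have hb : (decide (0 < a.2) && (normKind a.1 == k)) = true := by simp [not_le.1 hc, hk]
        rw [hb, if_pos rfl, List.map_cons, List.sum_cons]
        ring
      · rw [if_neg hk, ih]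
        have hb : (decide (0 < a.2) && (normKind a.1 == k)) = false := by simp [hk]
        rw [hb, if_neg (by simp)]

-- B's inner scan computes the same total A accumulates for kind k
theorem kindTotal_eq_pvT (raw : List (String × Int)) (k : String) :
    kindTotal (PySem.Dict.ofList raw).items k
      = pvT (fun key => (PySem.Dict.ofList raw).getD key 0) k
          (PySem.List.sorted (PySem.Dict.ofList raw).keys (fun x => x)) := by
  rw [pvT_perm _ _ (PySem.List.sorted_perm _ _ _)]
  rw [kindTotal_eq_sum, PySem.Dict.items_eq_map_keys _ (PySem.Dict.nodup_keys_ofList raw) 0]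
  rw [List.filter_map, List.map_map]
  simp [pvT, Function.comp_def]

-- A's result, characterised (stated over a generic source dict and key list)
theorem pvA_out (src : PySem.Dict String Int) (sk : List String)
    (o : PySem.Dict String Int)
    (ho : o = sk.foldl (fun acc key =>
        if src.getD key 0 ≤ 0 then acc
        else acc.insert (normKind key) (acc.getD (normKind key) 0 + src.getD key 0))
      PySem.Dict.empty) :
    (PySem.List.sorted o.keys (fun x => x)).map (fun k => (k, o.getD k 0))
      = (pvKS.filter (fun k => decide (0 < pvT (fun key => src.getD key 0) k sk))).map
          (fun k => (k, pvT (fun key => src.getD key 0) k sk)) := by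
  have hnd : o.keys.Nodup := by
    rw [ho]; exact pvFoldl_nodup _ _ _ (by simp)
  have hsub : ∀ x ∈ o.keys, x ∈ pvKinds := by
    intro x hx
    rw [ho] at hx
    rcases (pvFoldl_mem_keys _ _ _ _).1 hx with hd | ⟨key, _, _, hk⟩
    · simp at hd
    · rw [← hk]; exact normKind_mem key
  have hmem : ∀ k, (k ∈ o.keys) ↔ 0 < pvT (fun key => src.getD key 0) k sk := by
    intro k
    rw [ho, pvFoldl_mem_keys, pvT_pos_iff]
    simp
  have hval : ∀ k, o.getD k 0 = pvT (fun key => src.getD key 0) k sk := by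
    intro k
    rw [ho, pvFoldl_getD]
    simp
  rw [sorted_eq_filter o.keys hnd hsub]
  rw [List.filter_congr (fun k _ => by rw [decide_eq_decide.2 (hmem k)])]
  exact List.map_congr_left (fun k _ => by rw [hval k])

theorem pvA_char (raw : List (String × Int)) :
    normalize_provenance_kind_counts raw
      = (pvKS.filter (fun k => decide (0 < pvT (fun key => (PySem.Dict.ofList raw).getD key 0) k
            (PySem.List.sorted (PySem.Dict.ofList raw).keys (fun x => x))))).map
          (fun k => (k, pvT (fun key => (PySem.Dict.ofList raw).getD key 0) k
            (PySem.List.sorted (PySem.Dict.ofList raw).keys (fun x => x)))) := by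
  unfold normalize_provenance_kind_counts
  exact pvA_out (PySem.Dict.ofList raw) _ _ rfl

-- B's result, characterised
theorem pvB_char (raw : List (String × Int)) :
    normalize_provenance_kind_counts_alt raw
      = (pvKS.filter (fun k => decide (0 < kindTotal (PySem.Dict.ofList raw).items k))).map
          (fun k => (k, kindTotal (PySem.Dict.ofList raw).items k)) := by
  unfold normalize_provenance_kind_counts_alt
  simp only []
  rw [sorted_pvKinds, pvB_foldl]
  simp

-- ===== VERDICT (by name: the statement is the Claim_ definition above) =====
theorem normalize_provenance_kind_counts_spec : Claim_equal_normalize_provenance_kind_counts := by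
  intro raw _hdom
  unfold Spec_normalize_provenance_kind_counts
  rw [pvA_char, pvB_char]
  simp only [kindTotal_eq_pvT]
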